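-- pv_equiv track=rewrite | github.com/jbhinky/Theophilus-Axon | memory/neurobase/activation_path_resolver.py | traverse_paths
-- ===== SOURCE A (Python) =====
-- def traverse_paths(bond_map, start_node, depth, seen=None):
--     if seen is None:
--         seen = set()
--     if depth == 0 or start_node not in bond_map:
--         return []
--
--     seen.add(start_node)
--     paths = []
--
--     for target in bond_map[start_node]:
--         if target in seen:
--             continue
--         sub_paths = traverse_paths(bond_map, target, depth - 1, seen.copy())
--         if not sub_paths:
--             paths.append([start_node, target])
--         else:
--             for sub in sub_paths:
--                 paths.append([start_node] + sub)
--
--     return paths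
-- ===== SOURCE B (Python) =====
-- def traverse_paths(bond_map, start_node, depth, seen=None):
--     # Iterative DFS with an explicit frame stack instead of recursion.
--     out = []
--     stack = [(start_node, [start_node], set() if seen is None else set(seen), depth)]
--     while stack:
--         node, path, seen_s, rem = stack.pop()
--         if rem != 0 and node in bond_map:
--             children = [t for t in bond_map[node] if t not in seen_s and t != node]
--         else:
--             children = []
--         if children:
--             for t in reversed(children):
--                 stack.append((t, path + [t], seen_s | {node}, rem - 1))
--         elif len(path) >= 2:
--             out.append(path)
--     return out
-- ===== Notes on version B (the rewrite author's own statement) =====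
-- stated objective: alternative
-- what changed: Replaced A's recursive DFS (which builds child path lists and prepends the current node, with an empty-result sentinel triggering pair emission) by an iterative DFS over an explicit stack of (node, path, seen, remaining-depth) frames that emits a completed path when its last node has no admissible successor and the path has length >= 2.
import Mathlib
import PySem

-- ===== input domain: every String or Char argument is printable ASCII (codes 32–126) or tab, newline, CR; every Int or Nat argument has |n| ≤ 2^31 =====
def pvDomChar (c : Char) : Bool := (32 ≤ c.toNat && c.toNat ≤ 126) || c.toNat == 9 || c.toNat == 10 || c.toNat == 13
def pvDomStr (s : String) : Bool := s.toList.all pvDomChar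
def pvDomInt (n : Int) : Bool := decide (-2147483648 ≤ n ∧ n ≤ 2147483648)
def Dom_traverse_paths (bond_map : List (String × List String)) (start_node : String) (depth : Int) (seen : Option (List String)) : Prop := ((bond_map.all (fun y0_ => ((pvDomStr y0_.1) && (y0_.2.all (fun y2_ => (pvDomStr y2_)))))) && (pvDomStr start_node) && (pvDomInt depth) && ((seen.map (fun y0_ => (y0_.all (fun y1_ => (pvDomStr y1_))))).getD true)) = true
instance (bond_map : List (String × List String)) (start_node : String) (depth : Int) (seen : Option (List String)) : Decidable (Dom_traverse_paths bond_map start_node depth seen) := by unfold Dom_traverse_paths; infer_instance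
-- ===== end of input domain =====

-- B replaces A's recursive DFS by an explicit stack of frames (node, path, seen, remaining depth),
-- emitting a path when its last node has no admissible successor; equal return values (A also mutates
-- a caller-supplied `seen` set in place, B does not — the claim is about the return value only).

-- ===== PORT A =====

-- termination measure shared by the ports: number of bond_map keys not yet in `seen`
def pvFree (bond_map : List (String × List String)) (seen : PySem.Set String) : Nat :=
  ((bond_map.map Prod.fst).filter (fun k => !(PySem.Set.contains seen k))).length

def pvMu (bond_map : List (String × List String)) (node : String) (seen : PySem.Set String) : Nat :=
  2 * pvFree bond_map seen + (if PySem.Set.contains seen node then 1 else 0)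

theorem pvFilter_le {α : Type} (l : List α) (p q : α → Bool)
    (himp : ∀ x, q x = true → p x = true) :
    (l.filter q).length ≤ (l.filter p).length := by
  induction l with
  | nil => simp
  | cons a l ih =>
    by_cases hqa : q a = true
    · simp only [List.filter_cons, hqa, himp a hqa, if_pos]
      simpa using ih
    · have hqa' : q a = false := by cases h : q a <;> simp [h] at hqa ⊢
      simp only [List.filter_cons, hqa']
      cases hpa : p a <;> simp <;> omega

theorem pvFilter_length_lt {α : Type} (l : List α) (p q : α → Bool)
    (himp : ∀ x, q x = true → p x = true) (x : α) (hx : x ∈ l)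
    (hp : p x = true) (hq : q x = false) :
    (l.filter q).length < (l.filter p).length := by
  induction l with
  | nil => cases hx
  | cons a l ih =>
    rcases List.mem_cons.mp hx with rfl | hx'
    · have := pvFilter_le l p q himp
      simp [hp, hq]
      omega
    · by_cases hqa : q a = true
      · simp only [List.filter_cons, hqa, himp a hqa, if_pos, List.length_cons]
        simpa using Nat.succ_lt_succ (ih hx')
      · have hqa' : q a = false := by cases h : q a <;> simp [h] at hqa ⊢
        simp only [List.filter_cons, hqa']
        have h1 := ih hx'
        cases hpa : p a <;> simp <;> omega

theorem pvContains_eq_false_iff {α : Type} [BEq α] [LawfulBEq α] (s : PySem.Set α) (x : α) :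
    s.contains x = false ↔ x ∉ s := by
  constructor
  · intro h hm
    exact Bool.false_ne_true (h ▸ (PySem.Set.contains_iff s x).mpr hm)
  · intro h
    cases hc : PySem.Set.contains s x
    · rfl
    · exact absurd ((PySem.Set.contains_iff s x).mp hc) h

theorem pvFree_add_lt (bond_map : List (String × List String)) (seen : PySem.Set String)
    (node : String) (hkey : PySem.Dict.contains (PySem.Dict.mk bond_map) node = true)
    (hnot : PySem.Set.contains seen node = false) :
    pvFree bond_map (PySem.Set.add seen node) < pvFree bond_map seen := by
  unfold pvFree
  refine pvFilter_length_lt _ _ _ ?_ node ?_ ?_ ?_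
  · intro x hx
    simp only [Bool.not_eq_true', pvContains_eq_false_iff] at hx ⊢
    exact fun hm => hx ((PySem.Set.mem_add seen node x).mpr (Or.inl hm))
  · simpa [PySem.Dict.keys] using (PySem.Dict.contains_iff_mem_keys _ _).mp hkey
  · simp only [Bool.not_eq_true', pvContains_eq_false_iff]
    exact (pvContains_eq_false_iff seen node).mp hnot
  · have : PySem.Set.contains (PySem.Set.add seen node) node = true :=
      (PySem.Set.contains_iff _ _).mpr ((PySem.Set.mem_add seen node node).mpr (Or.inr rfl))
    simp [(PySem.Set.contains_iff _ _).mp this]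

theorem pvMu_child_lt (bond_map : List (String × List String)) (seen : PySem.Set String)
    (node t : String) (hkey : PySem.Dict.contains (PySem.Dict.mk bond_map) node = true)
    (ht : PySem.Set.contains seen t = false) (hne : (t == node) = false) :
    pvMu bond_map t (PySem.Set.add seen node) < pvMu bond_map node seen := by
  have htadd : PySem.Set.contains (PySem.Set.add seen node) t = false := by
    rw [pvContains_eq_false_iff]
    intro hm
    rcases (PySem.Set.mem_add seen node t).mp hm with h1 | h2
    · exact (pvContains_eq_false_iff seen t).mp ht h1
    · simp [h2] at hne
  by_cases hns : PySem.Set.contains seen node = true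
  · have heq : PySem.Set.add seen node = seen :=
      PySem.Set.add_of_mem ((PySem.Set.contains_iff seen node).mp hns)
    unfold pvMu
    rw [heq] at htadd ⊢
    simp only [htadd, hns, Bool.false_eq_true, if_true, if_false]
    omega
  · have hns' : PySem.Set.contains seen node = false := by
      cases h : PySem.Set.contains seen node
      · rfl
      · exact absurd h hns
    have hlt := pvFree_add_lt bond_map seen node hkey hns'
    unfold pvMu
    simp only [htadd, hns']
    omega

-- literal port of A's recursion: pvGoA = one call of traverse_paths with `seen` already a set,
-- pvLoopA = its `for target in bond_map[start_node]` loop with accumulator `paths`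
mutual
def pvGoA (bond_map : List (String × List String)) (node : String) (depth : Int)
    (seen : PySem.Set String) : List (List String) :=
  if depth == 0 || !(PySem.Dict.contains (PySem.Dict.mk bond_map) node) then []
  else
    -- bond_map[node]: guarded by the contains test, so getD is exact here
    pvLoopA bond_map (PySem.Dict.getD (PySem.Dict.mk bond_map) node []) node depth
      (PySem.Set.add seen node) []
termination_by (pvMu bond_map node seen, 0)
decreasing_by
  · rename_i h
    have hkey : PySem.Dict.contains (PySem.Dict.mk bond_map) node = true := by
      revert h
      cases PySem.Dict.contains (PySem.Dict.mk bond_map) node <;> simp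
    apply Prod.Lex.left
    by_cases hns : PySem.Set.contains seen node = true
    · rw [PySem.Set.add_of_mem ((PySem.Set.contains_iff seen node).mp hns)]
      unfold pvMu
      simp [(PySem.Set.contains_iff seen node).mp hns]
    · have hns' : PySem.Set.contains seen node = false := by
        cases hx : PySem.Set.contains seen node
        · rfl
        · exact absurd hx hns
      have := pvFree_add_lt bond_map seen node hkey hns'
      unfold pvMu
      omega

def pvLoopA (bond_map : List (String × List String)) (targets : List String) (node : String)
    (depth : Int) (seen : PySem.Set String) (paths : List (List String)) : List (List String) :=
  match targets with
  | [] => paths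
  | t :: ts =>
    if PySem.Set.contains seen t then pvLoopA bond_map ts node depth seen paths
    else
      let sub := pvGoA bond_map t (depth - 1) seen
      if sub.isEmpty then pvLoopA bond_map ts node depth seen (paths ++ [[node, t]])
      else pvLoopA bond_map ts node depth seen (paths ++ sub.map (fun s => node :: s))
termination_by (2 * pvFree bond_map seen, targets.length + 1)
decreasing_by
  · apply Prod.Lex.right
    simp
  · rename_i h
    have ht : PySem.Set.contains seen t = false := by
      revert h
      cases PySem.Set.contains seen t <;> simp
    have : pvMu bond_map t seen = 2 * pvFree bond_map seen := by
      unfold pvMu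
      simp [(pvContains_eq_false_iff seen t).mp ht]
    rw [this]
    apply Prod.Lex.right
    simp
  · apply Prod.Lex.right
    simp
  · apply Prod.Lex.right
    simp
end

def traverse_paths (bond_map : List (String × List String)) (start_node : String) (depth : Int)
    (seen : Option (List String)) : List (List String) :=
  pvGoA bond_map start_node depth
    (match seen with | none => PySem.Set.empty | some l => PySem.Set.ofList l)

-- ===== PORT B =====

-- valid successors of a frame's node (Source B's `children` list)
def pvChildren (bond_map : List (String × List String)) (node : String)
    (seen : PySem.Set String) (rem : Int) : List String :=
  if rem != 0 && PySem.Dict.contains (PySem.Dict.mk bond_map) node then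
    (PySem.Dict.getD (PySem.Dict.mk bond_map) node []).filter
      (fun t => !(PySem.Set.contains seen t) && t != node)
  else []

-- stack-measure constant: 1 + total number of listed bonds
def pvC (bond_map : List (String × List String)) : Nat :=
  (bond_map.map (fun p => p.2.length)).sum + 1

theorem pvC_pos (bond_map : List (String × List String)) : 0 < pvC bond_map := by
  unfold pvC
  omega

theorem pvGetD_length_le (bond_map : List (String × List String)) (node : String) :
    (PySem.Dict.getD (PySem.Dict.mk bond_map) node []).length
      ≤ (bond_map.map (fun p => p.2.length)).sum := by
  induction bond_map with
  | nil => simp [PySem.Dict.getD_eq_get?_getD]; rfl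
  | cons p rest ih =>
    obtain ⟨k, v⟩ := p
    rw [PySem.Dict.getD_eq_get?_getD] at ih ⊢
    rw [PySem.Dict.get?_mk_cons]
    by_cases hk : (k == node) = true
    · simp [hk]
    · have hk' : (k == node) = false := by cases h : (k == node) <;> simp [h] at hk ⊢
      simp only [hk', Bool.false_eq_true, if_false, List.map_cons, List.sum_cons]
      omega

theorem pvMu_pos_of_children (bond_map : List (String × List String)) (node : String)
    (seen : PySem.Set String) (hkey : PySem.Dict.contains (PySem.Dict.mk bond_map) node = true) :
    1 ≤ pvMu bond_map node seen := by
  unfold pvMu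
  by_cases hns : node ∈ seen
  · simp [hns]
  · have hnode : node ∈ (bond_map.map Prod.fst).filter (fun k => !(PySem.Set.contains seen k)) := by
      refine List.mem_filter.mpr ⟨?_, ?_⟩
      · simpa [PySem.Dict.keys] using (PySem.Dict.contains_iff_mem_keys _ _).mp hkey
      · simpa using hns
    have : 1 ≤ pvFree bond_map seen := List.length_pos_of_mem hnode
    omega

theorem pvChildren_spec (bond_map : List (String × List String)) (node t : String)
    (seen : PySem.Set String) (rem : Int) (ht : t ∈ pvChildren bond_map node seen rem) :
    PySem.Dict.contains (PySem.Dict.mk bond_map) node = true ∧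
      PySem.Set.contains seen t = false ∧ (t == node) = false := by
  unfold pvChildren at ht
  by_cases hc : (rem != 0 && PySem.Dict.contains (PySem.Dict.mk bond_map) node) = true
  · rw [if_pos hc] at ht
    have hkey := (Bool.and_eq_true _ _).mp hc |>.2
    have hpred : t ∉ seen ∧ ¬ t = node := by simpa using (List.mem_filter.mp ht).2
    refine ⟨hkey, (pvContains_eq_false_iff seen t).mpr hpred.1, ?_⟩
    cases h : (t == node)
    · rfl
    · exact absurd (by simpa using h) hpred.2
  · rw [if_neg hc] at ht
    cases ht

theorem pvStack_lt (bond_map : List (String × List String)) (node : String)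
    (seen : PySem.Set String) (rem : Int)
    (h : (pvChildren bond_map node seen rem).isEmpty = false) :
    ((pvChildren bond_map node seen rem).map
        (fun t => pvC bond_map ^ pvMu bond_map t (PySem.Set.add seen node))).sum
      < pvC bond_map ^ pvMu bond_map node seen := by
  have hne : pvChildren bond_map node seen rem ≠ [] := by
    intro hx
    rw [hx] at h
    simp at h
  obtain ⟨t0, ht0⟩ := List.exists_mem_of_ne_nil _ hne
  have hkey := (pvChildren_spec bond_map node t0 seen rem ht0).1
  have hmu1 : 1 ≤ pvMu bond_map node seen := pvMu_pos_of_children bond_map node seen hkey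
  set μ := pvMu bond_map node seen with hμ
  have hC := pvC_pos bond_map
  -- every child's term is ≤ pvC ^ (μ - 1)
  have hbound : ∀ x ∈ (pvChildren bond_map node seen rem).map
      (fun t => pvC bond_map ^ pvMu bond_map t (PySem.Set.add seen node)),
      x ≤ pvC bond_map ^ (μ - 1) := by
    intro x hx
    obtain ⟨t, ht, rfl⟩ := List.mem_map.mp hx
    obtain ⟨hk, h1, h2⟩ := pvChildren_spec bond_map node t seen rem ht
    have := pvMu_child_lt bond_map seen node t hk h1 h2
    exact Nat.pow_le_pow_right hC (by omega)
  have hsum := List.sum_le_card_nsmul _ _ hbound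
  rw [List.length_map] at hsum
  have hlen : (pvChildren bond_map node seen rem).length ≤ pvC bond_map - 1 := by
    unfold pvChildren
    by_cases hc : (rem != 0 && PySem.Dict.contains (PySem.Dict.mk bond_map) node) = true
    · rw [if_pos hc]
      have h1 := List.length_filter_le (fun t => !(PySem.Set.contains seen t) && t != node)
        (PySem.Dict.getD (PySem.Dict.mk bond_map) node [])
      have h2 := pvGetD_length_le bond_map node
      unfold pvC
      omega
    · rw [if_neg hc]
      simp
  calc ((pvChildren bond_map node seen rem).map
          (fun t => pvC bond_map ^ pvMu bond_map t (PySem.Set.add seen node))).sum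
      ≤ (pvChildren bond_map node seen rem).length * pvC bond_map ^ (μ - 1) := by
        simpa [smul_eq_mul] using hsum
    _ ≤ (pvC bond_map - 1) * pvC bond_map ^ (μ - 1) :=
        Nat.mul_le_mul_right _ hlen
    _ < pvC bond_map * pvC bond_map ^ (μ - 1) := by
        have hpow : 0 < pvC bond_map ^ (μ - 1) := Nat.pow_pos hC
        exact Nat.mul_lt_mul_of_lt_of_le (by omega) (le_refl _) hpow
    _ = pvC bond_map ^ μ := by
        rw [← pow_succ']
        congr 1
        omega

-- Source B's while loop; the stack is a list popped at the head (Source B pushes children reversed and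
-- pops from the end, which is the same traversal order)
def pvLoopB (bond_map : List (String × List String))
    (stack : List (String × List String × PySem.Set String × Int))
    (out : List (List String)) : List (List String) :=
  match stack with
  | [] => out
  | (node, path, seen, rem) :: rest =>
    let cs := pvChildren bond_map node seen rem
    if cs.isEmpty then
      pvLoopB bond_map rest (if 2 ≤ path.length then out ++ [path] else out)
    else
      pvLoopB bond_map
        (cs.map (fun t => (t, path ++ [t], PySem.Set.union seen [node], rem - 1)) ++ rest) out
termination_by (stack.map (fun fr => pvC bond_map ^ pvMu bond_map fr.1 fr.2.2.1)).sum
decreasing_by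
  · have hpow : 0 < pvC bond_map ^ pvMu bond_map node seen :=
      Nat.pow_pos (pvC_pos bond_map)
    simp only [List.map_cons, List.sum_cons]
    omega
  · rename_i h
    have h' : (pvChildren bond_map node seen rem).isEmpty = false := by
      cases hx : (pvChildren bond_map node seen rem).isEmpty
      · rfl
      · exact absurd hx h
    have := pvStack_lt bond_map node seen rem h'
    simp only [List.map_append, List.map_cons, List.sum_append, List.sum_cons, List.map_map]
    have heq : ((fun fr : String × List String × PySem.Set String × Int =>
          pvC bond_map ^ pvMu bond_map fr.1 fr.2.2.1) ∘
        fun t => (t, path ++ [t], PySem.Set.union seen [node], rem - 1))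
        = fun t => pvC bond_map ^ pvMu bond_map t (PySem.Set.add seen node) := rfl
    rw [heq]
    omega

def traverse_paths_alt (bond_map : List (String × List String)) (start_node : String) (depth : Int)
    (seen : Option (List String)) : List (List String) :=
  pvLoopB bond_map
    [(start_node, [start_node],
      (match seen with | none => PySem.Set.empty | some l => PySem.Set.ofList l), depth)] []

-- ===== PRECONDITION & SPEC =====
def Spec_traverse_paths (bond_map : List (String × List String)) (start_node : String) (depth : Int) (seen : Option (List String)) (out : List (List String)) : Prop := out = traverse_paths_alt bond_map start_node depth seen
instance (bond_map : List (String × List String)) (start_node : String) (depth : Int) (seen : Option (List String)) (out : List (List String)) : Decidable (Spec_traverse_paths bond_map start_node depth seen out) := by unfold Spec_traverse_paths; infer_instance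

-- ===== CLAIM (what is proved, stated in full; the proofs are below) =====
def Claim_equal_traverse_paths : Prop := ∀ (bond_map : List (String × List String)) (start_node : String) (depth : Int) (seen : Option (List String)), Dom_traverse_paths bond_map start_node depth seen → Spec_traverse_paths bond_map start_node depth seen (traverse_paths bond_map start_node depth seen)

-- ===== LEMMAS AND PROOFS =====

-- per-frame emitted paths, recursively (proof-side helper)
def pvE (bond_map : List (String × List String)) (node : String) (path : List String)
    (seen : PySem.Set String) (rem : Int) : List (List String) :=
  let cs := pvChildren bond_map node seen rem
  if h : cs.isEmpty then (if 2 ≤ path.length then [path] else [])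
  else cs.attach.flatMap
    (fun t => pvE bond_map t.1 (path ++ [t.1]) (PySem.Set.union seen [node]) (rem - 1))
termination_by pvMu bond_map node seen
decreasing_by
  obtain ⟨hk, h1, h2⟩ := pvChildren_spec bond_map node t.1 seen rem t.2
  exact pvMu_child_lt bond_map seen node t.1 hk h1 h2

theorem pvLoopB_frame (bond_map : List (String × List String)) :
    ∀ (n : Nat) (node : String) (path : List String) (seen : PySem.Set String) (rem : Int),
      pvMu bond_map node seen ≤ n →
      ∀ rest out, pvLoopB bond_map ((node, path, seen, rem) :: rest) out
        = pvLoopB bond_map rest (out ++ pvE bond_map node path seen rem) := by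
  intro n
  induction n using Nat.strong_induction_on with
  | _ n ih =>
    intro node path seen rem hmu rest out
    by_cases hcs : (pvChildren bond_map node seen rem).isEmpty = true
    · rw [pvLoopB, pvE]
      simp only [hcs, if_true, dif_pos]
      by_cases hl : 2 ≤ path.length <;> simp [hl]
    · have hcs' : (pvChildren bond_map node seen rem).isEmpty = false := by
        cases hx : (pvChildren bond_map node seen rem).isEmpty
        · rfl
        · exact absurd hx hcs
      rw [pvLoopB, pvE]
      simp only [hcs', Bool.false_eq_true, if_false]
      have hu : PySem.Set.union seen [node] = PySem.Set.add seen node := rfl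
      rw [hu]
      -- children all have strictly smaller measure
      have hchild : ∀ t ∈ pvChildren bond_map node seen rem,
          pvMu bond_map t (PySem.Set.add seen node) < n := by
        intro t ht
        obtain ⟨hk, h1, h2⟩ := pvChildren_spec bond_map node t seen rem ht
        exact lt_of_lt_of_le (pvMu_child_lt bond_map seen node t hk h1 h2) hmu
      -- generalize over the children sublist
      have main : ∀ (l : List String), (∀ t ∈ l, pvMu bond_map t (PySem.Set.add seen node) < n) →
          ∀ out', pvLoopB bond_map
              (l.map (fun t => (t, path ++ [t], PySem.Set.add seen node, rem - 1)) ++ rest) out'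
            = pvLoopB bond_map rest
                (out' ++ l.flatMap (fun t =>
                  pvE bond_map t (path ++ [t]) (PySem.Set.add seen node) (rem - 1))) := by
        intro l
        induction l with
        | nil => intro _ out'; simp
        | cons t l' ihl =>
          intro hlt out'
          simp only [List.map_cons, List.cons_append]
          rw [ih _ (hlt t List.mem_cons_self) _ _ _ _ (le_refl _)]
          rw [ihl (fun x hx => hlt x (List.mem_cons_of_mem _ hx))]
          simp [List.flatMap_cons]
      rw [main _ hchild out]
      congr 1
      simp

theorem pvContains_add (s : PySem.Set String) (x y : String) :
    PySem.Set.contains (PySem.Set.add s x) y = (PySem.Set.contains s y || y == x) := by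
  rw [Bool.eq_iff_iff]
  rw [Bool.or_eq_true]
  rw [PySem.Set.contains_iff, PySem.Set.contains_iff]
  rw [PySem.Set.mem_add]
  constructor
  · rintro (h | h)
    · exact Or.inl h
    · exact Or.inr (by simp [h])
  · rintro (h | h)
    · exact Or.inl h
    · exact Or.inr (by simpa using h)

theorem pvFlatMap_congr {α β : Type} (l : List α) (f g : α → List β)
    (h : ∀ x ∈ l, f x = g x) : l.flatMap f = l.flatMap g := by
  induction l with
  | nil => rfl
  | cons a l ih =>
    simp only [List.flatMap_cons]
    rw [h a List.mem_cons_self, ih (fun x hx => h x (List.mem_cons_of_mem _ hx))]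

-- A's loop, with the accumulator made explicit and skipped targets filtered out
theorem pvLoopA_eq (bond_map : List (String × List String)) (node : String) (d : Int)
    (seen : PySem.Set String) :
    ∀ (ts : List String) (acc : List (List String)),
      pvLoopA bond_map ts node d seen acc
        = acc ++ (ts.filter (fun t => !(PySem.Set.contains seen t))).flatMap
            (fun t =>
              let sub := pvGoA bond_map t (d - 1) seen
              if sub.isEmpty then [[node, t]] else sub.map (fun s => node :: s)) := by
  intro ts
  induction ts with
  | nil => intro acc; rw [pvLoopA]; simp
  | cons t ts ih =>
    intro acc
    rw [pvLoopA]
    by_cases hc : PySem.Set.contains seen t = true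
    · rw [if_pos hc, ih]
      simp [(PySem.Set.contains_iff seen t).mp hc]
    · have hc' : PySem.Set.contains seen t = false := by
        cases h : PySem.Set.contains seen t
        · rfl
        · exact absurd h hc
      have hm : t ∉ seen := (pvContains_eq_false_iff seen t).mp hc'
      rw [if_neg hc]
      by_cases hsub : (pvGoA bond_map t (d - 1) seen).isEmpty = true
      · rw [if_pos hsub, ih]
        simp [hm, List.isEmpty_iff.mp hsub]
      · have hne : pvGoA bond_map t (d - 1) seen ≠ [] := by
          intro h
          rw [h] at hsub
          simp at hsub
        rw [if_neg hsub, ih]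
        simp [hm, hne]

-- one unfolding of A's recursion, phrased over B's children list
theorem pvGoA_eq (bond_map : List (String × List String)) (node : String) (rem : Int)
    (seen : PySem.Set String) :
    pvGoA bond_map node rem seen
      = (pvChildren bond_map node seen rem).flatMap
          (fun t =>
            let sub := pvGoA bond_map t (rem - 1) (PySem.Set.add seen node)
            if sub.isEmpty then [[node, t]] else sub.map (fun s => node :: s)) := by
  rw [pvGoA]
  by_cases hc : (rem == 0 || !(PySem.Dict.contains (PySem.Dict.mk bond_map) node)) = true
  · rw [if_pos hc]
    have : pvChildren bond_map node seen rem = [] := by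
      unfold pvChildren
      rw [if_neg]
      intro h
      rcases Bool.or_eq_true _ _ |>.mp hc with h1 | h2
      · have hb := (Bool.and_eq_true _ _).mp h |>.1
        rw [bne, h1] at hb
        simp at hb
      · have := (Bool.and_eq_true _ _).mp h |>.2
        simp [this] at h2
    rw [this]
    rfl
  · rw [if_neg hc]
    rw [pvLoopA_eq]
    have hkey : PySem.Dict.contains (PySem.Dict.mk bond_map) node = true := by
      cases h : PySem.Dict.contains (PySem.Dict.mk bond_map) node
      · simp [h] at hc
      · rfl
    have hrem : (rem == 0) = false := by
      cases h : (rem == 0)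
      · rfl
      · simp [h, hkey] at hc
    have hch : pvChildren bond_map node seen rem
        = (PySem.Dict.getD (PySem.Dict.mk bond_map) node []).filter
            (fun t => !(PySem.Set.contains (PySem.Set.add seen node) t)) := by
      unfold pvChildren
      rw [if_pos (by simp [hkey, bne, hrem])]
      apply List.filter_congr
      intro t _
      rw [pvContains_add]
      cases h1 : PySem.Set.contains seen t <;> cases h2 : (t == node) <;> simp [bne, h2]
    rw [hch]
    simp

theorem pvE_eq_goA (bond_map : List (String × List String)) :
    ∀ (n : Nat) (node : String) (pre : List String) (seen : PySem.Set String) (rem : Int),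
      pvMu bond_map node seen ≤ n →
      pvE bond_map node (pre ++ [node]) seen rem
        = if (pvGoA bond_map node rem seen).isEmpty
          then (if 2 ≤ (pre ++ [node]).length then [pre ++ [node]] else [])
          else (pvGoA bond_map node rem seen).map (fun s => pre ++ s) := by
  intro n
  induction n using Nat.strong_induction_on with
  | _ n ih =>
    intro node pre seen rem hmu
    rw [pvE]
    by_cases hcs : (pvChildren bond_map node seen rem).isEmpty = true
    · have hnil : pvChildren bond_map node seen rem = [] := List.isEmpty_iff.mp hcs
      rw [dif_pos hcs, pvGoA_eq, hnil]
      simp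
    · have hnil : pvChildren bond_map node seen rem ≠ [] := by
        intro h
        rw [h] at hcs
        simp at hcs
      have hchild : ∀ t ∈ pvChildren bond_map node seen rem,
          pvMu bond_map t (PySem.Set.add seen node) < n := by
        intro t ht
        obtain ⟨hk, h1, h2⟩ := pvChildren_spec bond_map node t seen rem ht
        exact lt_of_lt_of_le (pvMu_child_lt bond_map seen node t hk h1 h2) hmu
      have hgo : pvGoA bond_map node rem seen ≠ [] := by
        rw [pvGoA_eq]
        obtain ⟨t0, ht0⟩ := List.exists_mem_of_ne_nil _ hnil
        intro hempty
        have h0 := List.flatMap_eq_nil_iff.mp hempty _ ht0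
        by_cases hs : (pvGoA bond_map t0 (rem - 1) (PySem.Set.add seen node)).isEmpty = true
        · simp [hs] at h0
        · have hne : pvGoA bond_map t0 (rem - 1) (PySem.Set.add seen node) ≠ [] := by
            intro h
            rw [h] at hs
            simp at hs
          simp [hne] at h0
      rw [dif_neg hcs]
      rw [if_neg (by simp [hgo])]
      have hu : PySem.Set.union seen [node] = PySem.Set.add seen node := rfl
      rw [hu]
      -- drop the attach
      have hatt : (pvChildren bond_map node seen rem).attach.flatMap
            (fun t => pvE bond_map t.1 ((pre ++ [node]) ++ [t.1]) (PySem.Set.add seen node) (rem - 1))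
          = (pvChildren bond_map node seen rem).flatMap
            (fun t => pvE bond_map t ((pre ++ [node]) ++ [t]) (PySem.Set.add seen node) (rem - 1)) := by
        simp
      rw [hatt]
      rw [pvGoA_eq, List.map_flatMap]
      apply pvFlatMap_congr
      intro t ht
      rw [ih _ (hchild t ht) t (pre ++ [node]) (PySem.Set.add seen node) (rem - 1) (le_refl _)]
      by_cases hs : (pvGoA bond_map t (rem - 1) (PySem.Set.add seen node)).isEmpty = true
      · have hsub : pvGoA bond_map t (rem - 1) (PySem.Set.add seen node) = [] :=
          List.isEmpty_iff.mp hs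
        rw [hsub]
        simp [List.length_append]
      · have hne : pvGoA bond_map t (rem - 1) (PySem.Set.add seen node) ≠ [] := by
          intro h
          rw [h] at hs
          simp at hs
        simp [List.isEmpty_eq_false_iff.mpr hne, List.append_assoc]

-- ===== VERDICT (by name: the statement is the Claim_ definition above) =====
theorem traverse_paths_spec : Claim_equal_traverse_paths := by
  intro bond_map start_node depth seen _
  unfold Spec_traverse_paths traverse_paths traverse_paths_alt
  set s0 := (match seen with | none => PySem.Set.empty | some l => PySem.Set.ofList l) with hs0
  rw [pvLoopB_frame bond_map (pvMu bond_map start_node s0) start_node [start_node] s0 depth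
      (le_refl _) [] []]
  rw [pvLoopB]
  have hpath : [start_node] = ([] : List String) ++ [start_node] := rfl
  rw [hpath]
  rw [pvE_eq_goA bond_map (pvMu bond_map start_node s0) start_node [] s0 depth (le_refl _)]
  by_cases h : (pvGoA bond_map start_node depth s0).isEmpty = true
  · rw [if_pos h]
    rw [List.isEmpty_iff.mp h]
    simp
  · have hne : pvGoA bond_map start_node depth s0 ≠ [] := by
      intro hx
      rw [hx] at h
      simp at h
    rw [if_neg h]
    simp
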